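-- pv_equiv track=rewrite | github.com/jkalleberg/DV-TrioTrain | triotrain/model_training/pipeline/phase.py | process_phase
-- ===== SOURCE A (Python) =====
-- def process_phase(txt: str) -> str:
--     """
--     Handle any special characters and only use '_' as a separator.
--
--     Input: 'A,Quick brown-fox jumped-over-the   lazy-dog'
--     Output: 'A_Quick_brown_fox_jumped_over_the_lazy_dog'
--     """
--     special_chars = "!#$%^&*()"
--     for special_char in special_chars:
--         txt = txt.replace(special_char, "")
--     standardize_seps = " -,"
--     for sep in standardize_seps:
--         txt = txt.replace(sep, "_")
--     return txt
-- ===== SOURCE B (Python) =====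
-- def process_phase(txt: str) -> str:
--     """Single pass over the characters instead of twelve whole-string replace passes."""
--     drop = {'!', '#', '$', '%', '^', '&', '*', '(', ')'}
--     seps = {' ', '-', ','}
--     out = []
--     for ch in txt:
--         if ch in drop:
--             continue
--         out.append('_' if ch in seps else ch)
--     return ''.join(out)
-- ===== Notes on version B (the rewrite author's own statement) =====
-- stated objective: alternative
-- what changed: Replaces twelve sequential whole-string str.replace passes with a single explicit pass over the characters that drops special characters and maps separator characters to underscores, joining once at the end.
import Mathlib
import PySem

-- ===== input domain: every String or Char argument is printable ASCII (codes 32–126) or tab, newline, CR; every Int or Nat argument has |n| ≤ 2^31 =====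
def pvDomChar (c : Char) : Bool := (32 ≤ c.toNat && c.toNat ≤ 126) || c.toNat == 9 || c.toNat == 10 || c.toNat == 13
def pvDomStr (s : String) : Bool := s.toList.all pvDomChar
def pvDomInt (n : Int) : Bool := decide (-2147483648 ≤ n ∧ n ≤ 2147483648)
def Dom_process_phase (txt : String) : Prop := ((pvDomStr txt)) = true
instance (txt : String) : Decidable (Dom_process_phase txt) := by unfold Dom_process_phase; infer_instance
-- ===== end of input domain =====

-- B replaces A's twelve sequential whole-string replace passes with one pass over the characters.


-- ===== PORT A =====
def process_phase (txt : String) : String :=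
  let txt1 := "!#$%^&*()".toList.foldl (fun t special_char => PySem.Str.replace t (String.ofList [special_char]) "") txt
  " -,".toList.foldl (fun t sep => PySem.Str.replace t (String.ofList [sep]) "_") txt1

-- ===== PORT B =====
def pvDrop : List Char := ['!', '#', '$', '%', '^', '&', '*', '(', ')']
def pvSeps : List Char := [' ', '-', ',']

def process_phase_alt (txt : String) : String :=
  String.ofList (txt.toList.foldl
    (fun out ch =>
      if ch ∈ pvDrop then out
      else out ++ [if ch ∈ pvSeps then '_' else ch]) [])

-- ===== PRECONDITION & SPEC =====
def Spec_process_phase (txt : String) (out : String) : Prop := out = process_phase_alt txt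
instance (txt : String) (out : String) : Decidable (Spec_process_phase txt out) := by unfold Spec_process_phase; infer_instance

-- ===== CLAIM (what is proved, stated in full; the proofs are below) =====
def Claim_equal_process_phase : Prop := ∀ (txt : String), Dom_process_phase txt → Spec_process_phase txt (process_phase txt)

-- ===== LEMMAS AND PROOFS =====

-- per-character effect of one single-char replace pass
def pvF1 (c : Char) (new : List Char) (x : Char) : List Char := if x = c then new else [x]

-- per-character effect of B's single pass
def pvG (x : Char) : List Char :=
  if x ∈ pvDrop then [] else if x ∈ pvSeps then ['_'] else [x]

theorem pv_go_single (c : Char) (new : List Char) (fuel : Nat) : ∀ (l acc : List Char),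
    l.length ≤ fuel →
    PySem.Chars.replace.go [c] new fuel l acc = acc.reverse ++ l.flatMap (pvF1 c new) := by
  induction fuel with
  | zero => intro l acc h; simp at h; simp [h, PySem.Chars.replace.go]
  | succ n ih =>
    intro l acc h
    cases l with
    | nil => simp [PySem.Chars.replace.go]
    | cons x t =>
      simp only [PySem.Chars.replace.go]
      by_cases hx : x = c
      · simp [List.isPrefixOf, pvF1, hx, ih t _ (by simpa using h)]
      · simp [List.isPrefixOf, pvF1, hx, Ne.symm hx, ih t _ (by simpa using h)]

theorem pv_replace_single (s : List Char) (c : Char) (new : List Char) :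
    PySem.Chars.replace s [c] new = s.flatMap (pvF1 c new) := by
  simpa [PySem.Chars.replace] using pv_go_single c new s.length s [] le_rfl

-- the twelve per-character effects composed equal B's per-character effect
theorem pv_head_eq (x : Char) :
    ((((((((((((pvF1 '!' [] x).flatMap (pvF1 '#' [])).flatMap (pvF1 '$' [])).flatMap
      (pvF1 '%' [])).flatMap (pvF1 '^' [])).flatMap (pvF1 '&' [])).flatMap
      (pvF1 '*' [])).flatMap (pvF1 '(' [])).flatMap (pvF1 ')' [])).flatMap
      (pvF1 ' ' ['_'])).flatMap (pvF1 '-' ['_'])).flatMap (pvF1 ',' ['_'])) = pvG x := by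
  by_cases h1 : x = '!'; · simp [pvF1, pvG, pvDrop, h1]
  by_cases h2 : x = '#'; · simp [pvF1, pvG, pvDrop, h2]
  by_cases h3 : x = '$'; · simp [pvF1, pvG, pvDrop, *]
  by_cases h4 : x = '%'; · simp [pvF1, pvG, pvDrop, *]
  by_cases h5 : x = '^'; · simp [pvF1, pvG, pvDrop, *]
  by_cases h6 : x = '&'; · simp [pvF1, pvG, pvDrop, *]
  by_cases h7 : x = '*'; · simp [pvF1, pvG, pvDrop, *]
  by_cases h8 : x = '('; · simp [pvF1, pvG, pvDrop, *]
  by_cases h9 : x = ')'; · simp [pvF1, pvG, pvDrop, *]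
  by_cases h10 : x = ' '; · simp [pvF1, pvG, pvDrop, pvSeps, *]
  by_cases h11 : x = '-'; · simp [pvF1, pvG, pvDrop, pvSeps, *]
  by_cases h12 : x = ','; · simp [pvF1, pvG, pvDrop, pvSeps, *]
  simp [pvF1, pvG, pvDrop, pvSeps, *]

-- the twelve flatMap passes over a list collapse to one flatMap of pvG
theorem pv_chain (s : List Char) :
    ((((((((((((s.flatMap (pvF1 '!' [])).flatMap (pvF1 '#' [])).flatMap (pvF1 '$' [])).flatMap
      (pvF1 '%' [])).flatMap (pvF1 '^' [])).flatMap (pvF1 '&' [])).flatMap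
      (pvF1 '*' [])).flatMap (pvF1 '(' [])).flatMap (pvF1 ')' [])).flatMap
      (pvF1 ' ' ['_'])).flatMap (pvF1 '-' ['_'])).flatMap (pvF1 ',' ['_'])) = s.flatMap pvG := by
  induction s with
  | nil => simp
  | cons x t ih =>
    simp only [List.flatMap_cons, List.flatMap_append, ih]
    rw [pv_head_eq]

-- A's whole pipeline, on the character list, is one flatMap of pvG
theorem pv_A_toList (txt : String) :
    (process_phase txt).toList = txt.toList.flatMap pvG := by
  have hs : "!#$%^&*()".toList = ['!', '#', '$', '%', '^', '&', '*', '(', ')'] := rfl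
  have ht : " -,".toList = [' ', '-', ','] := rfl
  simp only [process_phase, hs, ht, List.foldl]
  simp only [PySem.Str.toList_replace]
  simp only [String.toList_ofList, show ("" : String).toList = [] from rfl,
    show ("_" : String).toList = ['_'] from rfl, pv_replace_single]
  exact pv_chain txt.toList

-- B's fold with an appending accumulator is the same flatMap
theorem pv_B_fold (s : List Char) : ∀ acc : List Char,
    s.foldl (fun out ch => if ch ∈ pvDrop then out
      else out ++ [if ch ∈ pvSeps then '_' else ch]) acc = acc ++ s.flatMap pvG := by
  induction s with
  | nil => intro acc; simp
  | cons x t ih =>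
    intro acc
    by_cases hx : x ∈ pvDrop
    · simp [List.foldl, hx, ih, pvG]
    · by_cases hs : x ∈ pvSeps <;> simp [List.foldl, hx, hs, ih, pvG]

-- ===== VERDICT (by name: the statement is the Claim_ definition above) =====
theorem process_phase_spec : Claim_equal_process_phase := by
  intro txt _
  unfold Spec_process_phase
  have hB : (process_phase_alt txt).toList = txt.toList.flatMap pvG := by
    simp [process_phase_alt, pv_B_fold, String.toList_ofList]
  have h : (process_phase txt).toList = (process_phase_alt txt).toList := by
    rw [pv_A_toList, hB]
  exact String.toList_injective h
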